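-- pv_equiv track=rewrite | github.com/clawdthareja-blip/caps-k | core/delimiter.py | mark_every_k_tokens
-- ===== SOURCE A (Python) =====
-- def mark_every_k_tokens(
--     text: str,
--     marker: str,
--     k: int,
-- ) -> str:
--     """
--     Insert a prefix marker at the start and then every *k* whitespace tokens.
--
--     Output structure::
--
--         <CAT_xxxx> tok0 tok1 … tok(k-1)
--         <CAT_xxxx> tokk … tok(2k-1)
--         <CAT_xxxx> tok(2k) …
--
--     One marker per segment — no closing tags, no adjacent duplicates.
--
--     Parameters
--     ----------
--     text:
--         Raw text to mark (already sanitised).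
--     marker:
--         Prefix marker string, e.g. ``<EXT_abc7>``.
--     k:
--         Number of tokens per segment. Must be >= 1.
--
--     Returns
--     -------
--     str
--         Text with interleaved prefix markers.
--     """
--     if k < 1:
--         raise ValueError(f"k must be >= 1, got {k}")
--
--     tokens = text.split()
--
--     if not tokens:
--         return marker
--
--     segments: list[str] = []
--     for i in range(0, len(tokens), k):
--         chunk = " ".join(tokens[i : i + k])
--         segments.append(f"{marker} {chunk}")
--
--     return "\n".join(segments)
-- ===== SOURCE B (Python) =====
-- def mark_every_k_tokens(
--     text: str,
--     marker: str,
--     k: int,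
-- ) -> str:
--     """Single pass over enumerated tokens instead of slicing into k-sized chunks."""
--     if k < 1:
--         raise ValueError(f"k must be >= 1, got {k}")
--
--     pieces: list[str] = []
--     for i, tok in enumerate(text.split()):
--         if i % k == 0:
--             pieces.append(("\n" if i else "") + marker)
--         pieces.append(" " + tok)
--
--     return "".join(pieces) if pieces else marker
-- ===== Notes on version B (the rewrite author's own statement) =====
-- stated objective: alternative
-- what changed: B makes a single pass over enumerate(text.split()), emitting the marker (with a newline separator after the first segment) whenever the token index is a multiple of k and appending each token with one space, instead of A's slicing of the token list into k-sized chunks that are space-joined and then newline-joined.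
import Mathlib
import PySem

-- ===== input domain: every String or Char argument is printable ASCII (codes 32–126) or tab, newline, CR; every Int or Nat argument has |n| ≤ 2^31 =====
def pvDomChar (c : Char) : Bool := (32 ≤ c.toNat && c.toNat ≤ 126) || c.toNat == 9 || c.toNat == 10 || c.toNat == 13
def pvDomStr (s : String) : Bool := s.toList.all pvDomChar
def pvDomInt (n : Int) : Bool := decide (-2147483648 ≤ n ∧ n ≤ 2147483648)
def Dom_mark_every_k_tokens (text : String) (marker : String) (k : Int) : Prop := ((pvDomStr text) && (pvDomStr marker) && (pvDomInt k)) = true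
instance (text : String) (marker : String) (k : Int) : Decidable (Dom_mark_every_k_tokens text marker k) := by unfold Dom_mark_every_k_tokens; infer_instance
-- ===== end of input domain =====

-- B builds the marked text in one pass over enumerated tokens instead of slicing into k-sized chunks (alternative decomposition, same cost).


-- ===== PORT A =====
def mark_every_k_tokens (text : String) (marker : String) (k : Int) : String :=
  if k < 1 then ""  -- Python raises ValueError here; excluded by Pre_
  else
    let tokens := PySem.Str.split₀ text
    if tokens = [] then marker
    else
      let segments := (PySem.List.pyRange 0 (tokens.length : Int) k).foldl
        (fun segs i =>
          segs ++ [marker ++ " " ++ PySem.Str.join " " (PySem.List.slice tokens (some i) (some (i + k)))])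
        []
      PySem.Str.join "\n" segments

-- ===== PORT B =====
def mark_every_k_tokens_alt (text : String) (marker : String) (k : Int) : String :=
  if k < 1 then ""  -- Python raises ValueError here; excluded by Pre_
  else
    let pieces := (PySem.List.enumerate (PySem.Str.split₀ text)).foldl
      (fun acc p =>
        (if PySem.Int.mod p.1 k = 0 then acc ++ [(if p.1 = 0 then "" else "\n") ++ marker] else acc)
          ++ [" " ++ p.2])
      []
    if pieces = [] then marker else PySem.Str.join "" pieces

-- ===== PRECONDITION & SPEC =====
-- Python A raises ValueError when k < 1; Pre_ excludes exactly those inputs.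
def Pre_mark_every_k_tokens (text : String) (marker : String) (k : Int) : Prop := 1 ≤ k
instance (text : String) (marker : String) (k : Int) : Decidable (Pre_mark_every_k_tokens text marker k) := by unfold Pre_mark_every_k_tokens; infer_instance
def pvWitness_mark_every_k_tokens : String × String × Int := ("a b c", "<M>", 2)

def Spec_mark_every_k_tokens (text : String) (marker : String) (k : Int) (out : String) : Prop := out = mark_every_k_tokens_alt text marker k
instance (text : String) (marker : String) (k : Int) (out : String) : Decidable (Spec_mark_every_k_tokens text marker k out) := by unfold Spec_mark_every_k_tokens; infer_instance

-- ===== CLAIM (what is proved, stated in full; the proofs are below) =====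
def Claim_equal_mark_every_k_tokens : Prop := ∀ (text : String) (marker : String) (k : Int), Dom_mark_every_k_tokens text marker k → Pre_mark_every_k_tokens text marker k → Spec_mark_every_k_tokens text marker k (mark_every_k_tokens text marker k)

-- ===== LEMMAS AND PROOFS =====

-- the segment string "<marker> tok … tok" built from one chunk
def pvSeg (marker : String) (c : List String) : String := marker ++ " " ++ PySem.Str.join " " c

-- the token list cut into chunks of K (K ≥ 1 in all uses)
def pvChunks (K : Nat) : List String → List (List String)
  | [] => []
  | t :: ts => (t :: ts.take (K - 1)) :: pvChunks K (ts.drop (K - 1))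
  termination_by ts => ts.length
  decreasing_by simp

-- the piece list B's fold produces from index j on
def pvPieces (k : Int) (marker : String) : Int → List String → List String
  | _, [] => []
  | j, t :: ts =>
      (if PySem.Int.mod j k = 0 then [(if j = 0 then "" else "\n") ++ marker] else [])
        ++ (" " ++ t) :: pvPieces k marker (j + 1) ts

theorem pvChunks_nil (K : Nat) : pvChunks K [] = [] := by
  rw [pvChunks.eq_def]

theorem pvChunks_cons (K : Nat) (t : String) (ts : List String) :
    pvChunks K (t :: ts) = (t :: ts.take (K - 1)) :: pvChunks K (ts.drop (K - 1)) := by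
  rw [pvChunks.eq_def]

theorem pv_sapp_assoc (a b c : String) : (a ++ b) ++ c = a ++ (b ++ c) :=
  String.toList_inj.mp (by simp)

theorem pvmod (a k : Int) (hk : 0 < k) : PySem.Int.mod a k = a % k := by
  simp [PySem.Int.mod, Int.fmod_eq_emod, hk.le]

theorem pv_join_nil (sep : String) : PySem.Str.join sep [] = "" :=
  String.toList_inj.mp (by simp [PySem.Str.toList_join, PySem.Chars.join_nil])

theorem pv_join_singleton (sep p : String) : PySem.Str.join sep [p] = p :=
  String.toList_inj.mp (by simp [PySem.Str.toList_join, PySem.Chars.join_singleton])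

theorem pv_join_cons_cons (sep p q : String) (rest : List String) :
    PySem.Str.join sep (p :: q :: rest) = p ++ sep ++ PySem.Str.join sep (q :: rest) :=
  String.toList_inj.mp (by simp [PySem.Str.toList_join, PySem.Chars.join_cons_cons])

theorem pv_join_empty_cons (p : String) (rest : List String) :
    PySem.Str.join "" (p :: rest) = p ++ PySem.Str.join "" rest := by
  cases rest with
  | nil => rw [pv_join_singleton, pv_join_nil]; simp
  | cons q r => rw [pv_join_cons_cons]; exact String.toList_inj.mp (by simp)

theorem pv_join_empty_append (as bs : List String) :
    PySem.Str.join "" (as ++ bs) = PySem.Str.join "" as ++ PySem.Str.join "" bs := by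
  induction as with
  | nil => simp [pv_join_nil]
  | cons a as ih =>
      simp only [List.cons_append, pv_join_empty_cons, ih, pv_sapp_assoc]

theorem pv_join_sp (t : String) (c : List String) :
    PySem.Str.join "" ((" " ++ t) :: c.map (" " ++ ·)) = " " ++ PySem.Str.join " " (t :: c) := by
  induction c generalizing t with
  | nil => simp [pv_join_singleton]
  | cons q r ih =>
      rw [List.map_cons, pv_join_empty_cons, ih, pv_join_cons_cons]
      exact String.toList_inj.mp (by simp)

theorem pv_foldl_snoc {α β : Type} (l : List α) (f : α → β) (init : List β) :
    l.foldl (fun s x => s ++ [f x]) init = init ++ l.map f := by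
  induction l generalizing init with
  | nil => simp
  | cons a l ih => simp [ih]

theorem pv_pyRange_nil (a b s : Int) (hs : 0 < s) (h : b ≤ a) :
    PySem.List.pyRange a b s = [] := by
  rw [PySem.List.pyRange_of_pos a b hs, if_neg (not_lt.mpr h)]
  simp

theorem pv_pyRange_cons (a b s : Int) (hs : 0 < s) (h : a < b) :
    PySem.List.pyRange a b s = a :: PySem.List.pyRange (a + s) b s := by
  rw [PySem.List.pyRange_of_pos a b hs, PySem.List.pyRange_of_pos (a + s) b hs]
  by_cases h2 : a + s < b
  · rw [if_pos h, if_pos h2]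
    have e1 : b - a + s - 1 = (b - (a + s) + s - 1) + 1 * s := by ring
    have e2 : (b - a + s - 1) / s = (b - (a + s) + s - 1) / s + 1 := by
      rw [e1, Int.add_mul_ediv_right _ _ hs.ne']
    have e3 : 0 ≤ (b - (a + s) + s - 1) / s :=
      Int.ediv_nonneg (by omega) hs.le
    have e5 : ((b - a + s - 1) / s).toNat = ((b - (a + s) + s - 1) / s).toNat + 1 := by omega
    rw [e5, List.range_succ_eq_map, List.map_cons, List.map_map]
    refine List.cons_eq_cons.mpr ⟨by simp, List.map_congr_left ?_⟩
    intro x hx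
    simp only [Function.comp_apply]
    push_cast
    ring
  · rw [if_pos h, if_neg h2]
    have e1 : (b - a - 1) / s = 0 := Int.ediv_eq_zero_of_lt (by omega) (by omega)
    have e2 : b - a + s - 1 = (b - a - 1) + 1 * s := by ring
    have e3 : (b - a + s - 1) / s = 1 := by
      rw [e2, Int.add_mul_ediv_right _ _ hs.ne', e1]
      omega
    rw [e3]
    simp

theorem pv_map_slice (full : List String) (k : Int) (hk : 1 ≤ k) (j : Nat) :
    (PySem.List.pyRange (j : Int) (full.length : Int) k).map
        (fun i => PySem.List.slice full (some i) (some (i + k)))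
      = pvChunks k.toNat (full.drop j) := by
  rcases Nat.lt_or_ge j full.length with h | h
  · rw [pv_pyRange_cons _ _ _ (by omega) (by exact_mod_cast h), List.map_cons]
    have hk' : k = (k.toNat : Int) := by omega
    have hslice : PySem.List.slice full (some (j : Int)) (some ((j : Int) + k))
        = (full.drop j).take k.toNat := by
      rw [hk']; exact PySem.List.slice_natCast_add full j k.toNat
    have hstep : (j : Int) + k = ((j + k.toNat : Nat) : Int) := by push_cast; omega
    rw [hslice, hstep, pv_map_slice full k hk (j + k.toNat)]
    obtain ⟨t, ts, hts⟩ : ∃ t ts, full.drop j = t :: ts := by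
      cases hd : full.drop j with
      | nil => exfalso; have := congrArg List.length hd; simp at this; omega
      | cons t ts => exact ⟨t, ts, rfl⟩
    have h1 : full.drop (j + k.toNat) = (full.drop j).drop k.toNat := by
      rw [List.drop_drop]
    have hdd : full.drop (j + k.toNat) = ts.drop (k.toNat - 1) := by
      rw [h1, hts]
      conv_lhs => rw [show k.toNat = k.toNat - 1 + 1 from by omega]
      rw [List.drop_succ_cons]
    have htake : (full.drop j).take k.toNat = t :: ts.take (k.toNat - 1) := by
      rw [hts]
      conv_lhs => rw [show k.toNat = k.toNat - 1 + 1 from by omega]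
      rw [List.take_succ_cons]
    rw [hdd, htake, hts, pvChunks_cons]
  · rw [pv_pyRange_nil _ _ _ (by omega) (by exact_mod_cast h),
        List.drop_eq_nil_of_le h, pvChunks_nil]
    simp
termination_by full.length - j
decreasing_by omega

theorem pv_A_eq (text marker : String) (k : Int) (hk : 1 ≤ k)
    (h : PySem.Str.split₀ text ≠ []) :
    mark_every_k_tokens text marker k
      = PySem.Str.join "\n" ((pvChunks k.toNat (PySem.Str.split₀ text)).map (pvSeg marker)) := by
  unfold mark_every_k_tokens
  rw [if_neg (by omega)]
  simp only [h, ite_false]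
  rw [pv_foldl_snoc _ (fun i => marker ++ " " ++ PySem.Str.join " " (PySem.List.slice (PySem.Str.split₀ text) (some i) (some (i + k)))) []]
  rw [List.nil_append]
  rw [show (fun i => marker ++ " " ++ PySem.Str.join " " (PySem.List.slice (PySem.Str.split₀ text) (some i) (some (i + k))))
        = (pvSeg marker) ∘ (fun i => PySem.List.slice (PySem.Str.split₀ text) (some i) (some (i + k))) from rfl]
  rw [← List.map_map]
  rw [show (0 : Int) = ((0 : Nat) : Int) from rfl, pv_map_slice _ _ hk 0, List.drop_zero]

theorem pv_enum_foldl (k : Int) (marker : String) (ts : List String) (j : Int) (acc : List String) :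
    (PySem.List.enumerate ts j).foldl
        (fun acc p =>
          (if PySem.Int.mod p.1 k = 0 then acc ++ [(if p.1 = 0 then "" else "\n") ++ marker] else acc)
            ++ [" " ++ p.2]) acc
      = acc ++ pvPieces k marker j ts := by
  induction ts generalizing j acc with
  | nil => simp [PySem.List.enumerate, pvPieces]
  | cons t ts ih =>
      rw [show PySem.List.enumerate (t :: ts) j = (j, t) :: PySem.List.enumerate ts (j + 1) from rfl]
      rw [List.foldl_cons, ih, pvPieces]
      by_cases h1 : PySem.Int.mod j k = 0 <;> simp [h1, List.append_assoc]

theorem pv_pieces_append (k : Int) (marker : String) (us vs : List String) (j : Int) :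
    pvPieces k marker j (us ++ vs)
      = pvPieces k marker j us ++ pvPieces k marker (j + us.length) vs := by
  induction us generalizing j with
  | nil => simp [pvPieces]
  | cons u us ih =>
      simp only [List.cons_append, pvPieces, ih, List.length_cons, List.append_assoc,
        List.cons_append]
      have : j + 1 + (us.length : Int) = j + ((us.length : Nat) + 1 : Nat) := by push_cast; ring
      rw [this]

theorem pv_pieces_plain (k : Int) (marker : String) (hk : 1 ≤ k) (us : List String) (j : Int)
    (h1 : 0 < PySem.Int.mod j k) (h2 : PySem.Int.mod j k + us.length ≤ k) :
    pvPieces k marker j us = us.map (" " ++ ·) := by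
  induction us generalizing j with
  | nil => simp [pvPieces]
  | cons u us ih =>
      rw [pvPieces, if_neg (by omega), List.nil_append, List.map_cons]
      rw [pvmod _ _ (by omega)] at h1 h2
      cases us with
      | nil => simp [pvPieces]
      | cons v vs =>
          have hmod : PySem.Int.mod (j + 1) k = j % k + 1 := by
            rw [pvmod _ _ (by omega)]
            have hd := Int.mul_ediv_add_emod j k
            have e1 : j + 1 = (j % k + 1) + k * (j / k) := by omega
            rw [e1, Int.add_mul_emod_self_left]
            refine Int.emod_eq_of_lt (by omega) ?_
            simp at h2
            omega
          rw [ih (j + 1) (by rw [hmod]; omega)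
            (by rw [hmod]; simp at h2 ⊢; omega)]

theorem pv_join_pieces (k : Int) (marker : String) (hk : 1 ≤ k) (t : String)
    (ts' : List String) (m : Nat) :
    PySem.Str.join "" (pvPieces k marker ((m : Int) * k) (t :: ts'))
      = (if m = 0 then "" else "\n")
          ++ PySem.Str.join "\n" ((pvChunks k.toNat (t :: ts')).map (pvSeg marker)) := by
  have hK : 1 ≤ k.toNat := by omega
  have hpp : pvPieces k marker ((m : Int) * k) (t :: ts')
      = ((if m = 0 then "" else "\n") ++ marker) :: (" " ++ t)
          :: pvPieces k marker ((m : Int) * k + 1) ts' := by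
    rw [pvPieces, if_pos (by rw [pvmod _ _ (by omega)]; exact Int.mul_emod_left _ _)]
    rcases Nat.eq_zero_or_pos m with hm | hm
    · subst hm; simp
    · have hne0 : ((m : Int) * k) ≠ 0 := by
        have : (0 : Int) < (m : Int) * k := by positivity
        omega
      rw [if_neg hne0, if_neg (by omega)]
      simp
  obtain ⟨us, hus⟩ : ∃ us, ts'.take (k.toNat - 1) = us := ⟨_, rfl⟩
  obtain ⟨vs, hvs⟩ : ∃ vs, ts'.drop (k.toNat - 1) = vs := ⟨_, rfl⟩
  have hsplit : us ++ vs = ts' := by rw [← hus, ← hvs]; exact List.take_append_drop _ _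
  have hust : us.length ≤ k.toNat - 1 := by
    rw [← hus]; exact List.length_take_le _ _
  have husmap : pvPieces k marker ((m : Int) * k + 1) us = us.map (" " ++ ·) := by
    cases hu : us with
    | nil => simp [pvPieces]
    | cons u us' =>
        have hk2 : 2 ≤ k.toNat := by
          have : 1 ≤ us.length := by rw [hu]; simp
          omega
        have hmod1 : PySem.Int.mod ((m : Int) * k + 1) k = 1 := by
          rw [pvmod _ _ (by omega),
            show (m : Int) * k + 1 = 1 + k * (m : Int) from by ring,
            Int.add_mul_emod_self_left]
          exact Int.emod_eq_of_lt (by omega) (by omega)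
        rw [← hu]
        refine pv_pieces_plain k marker hk us _ (by rw [hmod1]; omega) ?_
        rw [hmod1]
        omega
  rw [hpp, ← hsplit, pv_pieces_append, husmap]
  cases vs with
  | nil =>
      rw [show pvPieces k marker ((m : Int) * k + 1 + (us.length : Int)) [] = [] from rfl,
        List.append_nil, List.append_nil]
      have htk : us.take (k.toNat - 1) = us := List.take_of_length_le hust
      have hdr : us.drop (k.toNat - 1) = [] := List.drop_eq_nil_of_le hust
      rw [pvChunks_cons, htk, hdr, pvChunks_nil, List.map_cons, List.map_nil,
        pv_join_singleton, pv_join_empty_cons, pv_join_sp, pvSeg]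
      simp only [pv_sapp_assoc]
  | cons v vs' =>
      have husl : us.length = k.toNat - 1 := by
        have hgt : k.toNat - 1 ≤ ts'.length := by
          by_contra hcon
          have : ts'.drop (k.toNat - 1) = [] := List.drop_eq_nil_of_le (by omega)
          rw [hvs] at this
          exact absurd this (by simp)
        rw [← hus, List.length_take]
        omega
      have hidx : (m : Int) * k + 1 + (us.length : Int) = ((m + 1 : Nat) : Int) * k := by
        have hcast : ((k.toNat : Nat) : Int) = k := by omega
        rw [husl]
        push_cast [Nat.cast_sub hK]
        rw [hcast]
        ring
      have hrec := pv_join_pieces k marker hk v vs' (m + 1)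
      rw [if_neg (by omega)] at hrec
      rw [hidx]
      rw [← List.cons_append, ← List.cons_append, pv_join_empty_append,
        pv_join_empty_cons, pv_join_sp, hrec]
      conv_rhs => rw [pvChunks_cons]
      have htk : (us ++ v :: vs').take (k.toNat - 1) = us := by
        rw [← husl, List.take_left]
      have hdr : (us ++ v :: vs').drop (k.toNat - 1) = v :: vs' := by
        rw [← husl, List.drop_left]
      rw [htk, hdr, List.map_cons]
      obtain ⟨c, cs, hc⟩ : ∃ c cs, (pvChunks k.toNat (v :: vs')).map (pvSeg marker) = c :: cs := by
        rw [pvChunks_cons, List.map_cons]; exact ⟨_, _, rfl⟩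
      rw [hc, pv_join_cons_cons, pvSeg]
      simp only [pv_sapp_assoc]
termination_by ts'.length
decreasing_by
  have := congrArg List.length hsplit
  simp at this
  omega

theorem pv_B_eq (text marker : String) (k : Int) (hk : 1 ≤ k)
    (h : PySem.Str.split₀ text ≠ []) :
    mark_every_k_tokens_alt text marker k
      = PySem.Str.join "\n" ((pvChunks k.toNat (PySem.Str.split₀ text)).map (pvSeg marker)) := by
  unfold mark_every_k_tokens_alt
  rw [if_neg (by omega)]
  rw [pv_enum_foldl, List.nil_append]
  obtain ⟨t, ts', hts⟩ : ∃ t ts', PySem.Str.split₀ text = t :: ts' := by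
    cases hd : PySem.Str.split₀ text with
    | nil => exact absurd hd h
    | cons t ts' => exact ⟨t, ts', rfl⟩
  have hpne : pvPieces k marker 0 (PySem.Str.split₀ text) ≠ [] := by
    rw [hts, pvPieces]
    by_cases h1 : PySem.Int.mod 0 k = 0 <;> simp [h1]
  rw [if_neg hpne, hts]
  have hjp := pv_join_pieces k marker hk t ts' 0
  rw [if_pos rfl] at hjp
  rw [show ((0 : Nat) : Int) * k = (0 : Int) by simp] at hjp
  rw [hjp]
  exact String.toList_inj.mp (by simp)

-- ===== VERDICT (by name: the statement is the Claim_ definition above) =====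
theorem mark_every_k_tokens_spec : Claim_equal_mark_every_k_tokens := by
  intro text marker k _ hpre
  unfold Spec_mark_every_k_tokens
  have hk : 1 ≤ k := hpre
  by_cases hts : PySem.Str.split₀ text = []
  · have hA : mark_every_k_tokens text marker k = marker := by
      unfold mark_every_k_tokens
      rw [if_neg (by omega)]
      simp [hts]
    have hB : mark_every_k_tokens_alt text marker k = marker := by
      unfold mark_every_k_tokens_alt
      rw [if_neg (by omega)]
      simp [hts]
    rw [hA, hB]
  · rw [pv_A_eq text marker k hk hts, pv_B_eq text marker k hk hts]
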